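-- pv_equiv track=rewrite | github.com/Joie-Kim/python_ex | final_exercise/ex15.py | chkDupNum
-- ===== SOURCE A (Python) =====
-- def chkDupNum(s):
--     result = []
--     for num in s:
--         if num not in result:
--             result.append(num)
--         else:
--             return False # 중복되는 값이 있다면 False 반환
--     return len(result) == 10 # 0~9 모두 있으면 True, 없으면 False
-- ===== SOURCE B (Python) =====
-- def chkDupNum(s):
--     items = list(s)
--     return len(set(items)) == len(items) == 10
-- ===== Notes on version B (the rewrite author's own statement) =====
-- stated objective: simpler
-- what changed: Replaced the per-element loop with nested membership scans and an early-return branch by one closed-form cardinality comparison len(set(items)) == len(items) == 10.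
import Mathlib
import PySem

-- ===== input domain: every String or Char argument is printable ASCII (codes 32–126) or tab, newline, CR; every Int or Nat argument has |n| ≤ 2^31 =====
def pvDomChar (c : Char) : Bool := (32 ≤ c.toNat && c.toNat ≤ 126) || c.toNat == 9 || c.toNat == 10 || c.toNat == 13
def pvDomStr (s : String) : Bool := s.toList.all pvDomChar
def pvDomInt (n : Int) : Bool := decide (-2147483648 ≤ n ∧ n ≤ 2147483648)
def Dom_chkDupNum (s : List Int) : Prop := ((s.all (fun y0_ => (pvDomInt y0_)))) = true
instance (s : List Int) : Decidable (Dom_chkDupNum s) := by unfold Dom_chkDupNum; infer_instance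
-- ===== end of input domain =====

-- B replaces A's per-element membership loop with the closed-form comparison len(set(items)) == len(items) == 10 (simpler).

-- ===== PORT A =====
-- loop over s with accumulator 'result': early return False on duplicate, else append
def chkDupNumLoop (l : List Int) (result : List Int) : Bool :=
  match l with
  | [] => result.length == 10
  | num :: rest =>
      if ¬ result.contains num then chkDupNumLoop rest (result ++ [num])
      else false

def chkDupNum (s : List Int) : Bool := chkDupNumLoop s []

-- ===== PORT B =====
def chkDupNum_alt (s : List Int) : Bool :=
  let items := s
  ((PySem.Set.ofList items).length == items.length) && (items.length == 10)

-- ===== PRECONDITION & SPEC =====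
def Spec_chkDupNum (s : List Int) (out : Bool) : Prop := out = chkDupNum_alt s
instance (s : List Int) (out : Bool) : Decidable (Spec_chkDupNum s out) := by unfold Spec_chkDupNum; infer_instance

-- ===== CLAIM (what is proved, stated in full; the proofs are below) =====
def Claim_equal_chkDupNum : Prop := ∀ (s : List Int), Dom_chkDupNum s → Spec_chkDupNum s (chkDupNum s)

-- ===== LEMMAS AND PROOFS =====
theorem set_update_length_le (l : List Int) (s : PySem.Set Int) :
    (PySem.Set.update s l).length ≤ s.length + l.length := by
  induction l generalizing s with
  | nil => simp [PySem.Set.update]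
  | cons x xs ih =>
      have h1 : (PySem.Set.add s x).length ≤ s.length + 1 := by
        simp only [PySem.Set.add]
        split <;> simp
      have h2 := ih (PySem.Set.add s x)
      simp only [PySem.Set.update, List.foldl_cons, List.length_cons] at *
      omega

theorem loop_eq (l result : List Int) :
    chkDupNumLoop l result =
      (((PySem.Set.update result l).length == result.length + l.length) &&
        (result.length + l.length == 10)) := by
  induction l generalizing result with
  | nil => simp [chkDupNumLoop, PySem.Set.update]
  | cons num rest ih =>
      simp only [chkDupNumLoop, PySem.Set.update, List.foldl_cons, List.length_cons]
      by_cases h : result.contains num = true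
      · rw [if_neg (not_not_intro h)]
        have hadd : PySem.Set.add result num = result := by
          have hm : num ∈ result := by simpa using h
          simp [PySem.Set.add, PySem.Set.contains, hm]
        rw [hadd]
        have hle := set_update_length_le rest result
        simp only [PySem.Set.update] at hle
        have hne : ((List.foldl PySem.Set.add result rest).length == result.length + (rest.length + 1)) = false := by
          simp only [beq_eq_false_iff_ne, ne_eq]
          omega
        rw [hne, Bool.false_and]
      · rw [if_pos h]
        have hadd : PySem.Set.add result num = result ++ [num] := by
          have hm : num ∉ result := by simpa using h
          simp [PySem.Set.add, PySem.Set.contains, hm]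
        rw [ih, hadd]
        simp only [PySem.Set.update, List.length_append, List.length_cons, List.length_nil]
        have : result.length + 1 + rest.length = result.length + (rest.length + 1) := by omega
        rw [this]

-- ===== VERDICT (by name: the statement is the Claim_ definition above) =====
theorem chkDupNum_spec : Claim_equal_chkDupNum := by
  intro s _
  unfold Spec_chkDupNum chkDupNum chkDupNum_alt
  rw [loop_eq]
  simp [PySem.Set.update, PySem.Set.ofList_eq_foldl]
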